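-- pv_equiv track=rewrite | github.com/Fizic/5bukv-tinkoff-guesser | main.py | filter_exact_match
-- ===== SOURCE A (Python) =====
-- def filter_exact_match(words: list, suggested_word: str, answer: str) -> list:
--     for letter_index, status in enumerate(answer):
--         if status != '2':
--             continue
--
--         filtered_words = []
--         for word in words:
--             if word[letter_index] == suggested_word[letter_index]:
--                 filtered_words.append(word)
--
--         words = filtered_words.copy()
--         filtered_words.clear()
--
--     return words
-- ===== SOURCE B (Python) =====
-- def filter_exact_match(words: list, suggested_word: str, answer: str) -> list:
--     twos = [i for i, status in enumerate(answer) if status == '2']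
--     return [word for word in words
--             if all(word[i] == suggested_word[i] for i in twos)]
-- ===== Notes on version B (the rewrite author's own statement) =====
-- stated objective: simpler
-- what changed: B precomputes the list of '2' positions once and keeps each word in a single pass iff it matches suggested_word at all those positions, instead of A's rebuilding of the whole word list once per '2' position.
-- outside the precondition, e.g. on filter_exact_match(['ab', 'x'], 'ab', '22'): A returns ['ab'], B returns ['ab']
import Mathlib
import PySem

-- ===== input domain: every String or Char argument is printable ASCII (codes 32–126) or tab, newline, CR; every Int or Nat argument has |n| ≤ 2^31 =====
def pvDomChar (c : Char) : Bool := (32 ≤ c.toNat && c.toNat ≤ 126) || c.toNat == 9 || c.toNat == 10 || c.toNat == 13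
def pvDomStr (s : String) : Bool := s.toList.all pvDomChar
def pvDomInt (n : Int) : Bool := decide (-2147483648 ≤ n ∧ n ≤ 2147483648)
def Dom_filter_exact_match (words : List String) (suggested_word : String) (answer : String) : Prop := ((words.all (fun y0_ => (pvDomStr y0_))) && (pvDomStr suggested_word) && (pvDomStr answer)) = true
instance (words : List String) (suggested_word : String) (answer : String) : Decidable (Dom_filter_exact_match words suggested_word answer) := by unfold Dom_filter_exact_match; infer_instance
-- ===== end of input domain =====

-- B replaces A's per-'2'-position rebuild of the word list by one pass that keeps a word iff it
-- matches suggested_word at every precomputed '2' position; objective: simpler.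


-- ===== PORT A =====
def filter_exact_match (words : List String) (suggested_word : String) (answer : String) : List String :=
  (PySem.List.enumerate answer.toList).foldl
    (fun ws p =>
      if p.2 ≠ '2' then ws
      else
        ws.foldl
          (fun acc word =>
            if PySem.Str.pyGet? word p.1 = PySem.Str.pyGet? suggested_word p.1 then acc ++ [word]
            else acc)
          [])
    words

-- ===== PORT B =====
def filter_exact_match_alt (words : List String) (suggested_word : String) (answer : String) : List String :=
  let twos : List Int :=
    (PySem.List.enumerate answer.toList).filterMap (fun p => if p.2 = '2' then some p.1 else none)
  words.filter (fun word =>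
    twos.all (fun i => decide (PySem.Str.pyGet? word i = PySem.Str.pyGet? suggested_word i)))

-- ===== PRECONDITION & SPEC =====
-- Pre_ excludes inputs where some '2' position of answer is out of range for suggested_word or for
-- some word in the list; on most of those A raises IndexError (a word dropped at an earlier '2'
-- position can avoid the later out-of-range access, so Pre_ is slightly stronger than A's
-- return condition — on such inputs A and B still return the same value).
def Pre_filter_exact_match (words : List String) (suggested_word : String) (answer : String) : Prop :=
  ∀ i : Nat, i < answer.toList.length → answer.toList.getD i ' ' = '2' →
    i < suggested_word.toList.length ∧ ∀ w ∈ words, i < w.toList.length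
instance (words : List String) (suggested_word : String) (answer : String) : Decidable (Pre_filter_exact_match words suggested_word answer) := by unfold Pre_filter_exact_match; infer_instance
def pvWitness_filter_exact_match : List String × String × String := (["ab", "cb", "cc"], "cb", "02")
def Spec_filter_exact_match (words : List String) (suggested_word : String) (answer : String) (out : List String) : Prop := out = filter_exact_match_alt words suggested_word answer
instance (words : List String) (suggested_word : String) (answer : String) (out : List String) : Decidable (Spec_filter_exact_match words suggested_word answer out) := by unfold Spec_filter_exact_match; infer_instance

-- ===== CLAIM (what is proved, stated in full; the proofs are below) =====
def Claim_equal_filter_exact_match : Prop := ∀ (words : List String) (suggested_word : String) (answer : String), Dom_filter_exact_match words suggested_word answer → Pre_filter_exact_match words suggested_word answer → Spec_filter_exact_match words suggested_word answer (filter_exact_match words suggested_word answer)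

-- ===== LEMMAS AND PROOFS =====

-- The outer A-loop over any list of (index, status) pairs equals one filter by the conjunction of
-- the per-'2'-position tests (B's shape); holds unconditionally, no Pre_ needed.
theorem pvLoop_eq (sw : String) (L : List (Int × Char)) (ws : List String) :
    L.foldl
      (fun ws p =>
        if p.2 ≠ '2' then ws
        else
          ws.foldl
            (fun acc word =>
              if PySem.Str.pyGet? word p.1 = PySem.Str.pyGet? sw p.1 then acc ++ [word]
              else acc)
            [])
      ws
    = ws.filter (fun word =>
        (L.filterMap (fun p => if p.2 = '2' then some p.1 else none)).all
          (fun i => decide (PySem.Str.pyGet? word i = PySem.Str.pyGet? sw i))) := by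
  induction L generalizing ws with
  | nil => simp
  | cons p rest ih =>
    by_cases h : p.2 = '2'
    · simp only [List.foldl_cons, h, ne_eq, not_true_eq_false, if_false, if_true,
        List.filterMap_cons, List.all_cons]
      rw [PySem.List.foldl_append_ite_eq_filter, List.nil_append, ih, List.filter_filter]
      apply List.filter_congr
      intro w _
      simp [Bool.and_comm]
    · simp only [List.foldl_cons, h, ne_eq, not_false_eq_true, if_true,
        List.filterMap_cons]
      exact ih ws

-- ===== VERDICT (by name: the statement is the Claim_ definition above) =====
theorem filter_exact_match_spec : Claim_equal_filter_exact_match := by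
  intro words sw answer _ _
  unfold Spec_filter_exact_match filter_exact_match filter_exact_match_alt
  exact pvLoop_eq sw (PySem.List.enumerate answer.toList) words
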